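-- pv_equiv track=rewrite | github.com/liyibo/text-classification-demos | multi_label_bert.py | compute_confuse_matrix
-- ===== SOURCE A (Python) =====
-- def compute_confuse_matrix(target_y, predict_y):
--     """
--     compute TP, FP, FN given target lable and predict label
--     :param target_y:
--     :param predict_y:
--     :param label_dict {label:(TP,FP,FN)}
--     :return: macro_f1(a scalar),micro_f1(a scalar)
--     """
--     # count number of TP,FP,FN for each class
--
--     label_dict = {}
--     for i in range(89):
--         label_dict[i] = (0, 0, 0)
--
--     for num in range(len(target_y)):
--         targe_tmp = target_y[num]
--         pre_tmp = predict_y[num]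
--         unique_labels = set(targe_tmp + pre_tmp)
--         for label in unique_labels:
--             TP, FP, FN = label_dict[label]
--             if label in pre_tmp and label in targe_tmp:  # predict=1,truth=1 (TP)
--                 TP = TP + 1
--             elif label in pre_tmp and label not in targe_tmp:  # predict=1,truth=0(FP)
--                 FP = FP + 1
--             elif label not in pre_tmp and label in targe_tmp:  # predict=0,truth=1(FN)
--                 FN = FN + 1
--             label_dict[label] = (TP, FP, FN)
--     return label_dict
-- ===== SOURCE B (Python) =====
-- def compute_confuse_matrix(target_y, predict_y):
--     """
--     compute TP, FP, FN given target lable and predict label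
--     """
--     samples = [(set(target_y[i]), set(predict_y[i])) for i in range(len(target_y))]
--     return {label: (sum(1 for ts, ps in samples if label in ts and label in ps),
--                     sum(1 for ts, ps in samples if label in ps and label not in ts),
--                     sum(1 for ts, ps in samples if label in ts and label not in ps))
--             for label in range(89)}
-- ===== Notes on version B (the rewrite author's own statement) =====
-- stated objective: alternative
-- what changed: Transposes the loops: instead of A's sample-major single pass mutating a dict via per-label if/elif dispatch over each sample's union set, B precomputes the per-sample label sets once and then builds the whole result in one label-major dict comprehension, counting TP/FP/FN for each label 0..88 over all samples.
import Mathlib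
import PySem

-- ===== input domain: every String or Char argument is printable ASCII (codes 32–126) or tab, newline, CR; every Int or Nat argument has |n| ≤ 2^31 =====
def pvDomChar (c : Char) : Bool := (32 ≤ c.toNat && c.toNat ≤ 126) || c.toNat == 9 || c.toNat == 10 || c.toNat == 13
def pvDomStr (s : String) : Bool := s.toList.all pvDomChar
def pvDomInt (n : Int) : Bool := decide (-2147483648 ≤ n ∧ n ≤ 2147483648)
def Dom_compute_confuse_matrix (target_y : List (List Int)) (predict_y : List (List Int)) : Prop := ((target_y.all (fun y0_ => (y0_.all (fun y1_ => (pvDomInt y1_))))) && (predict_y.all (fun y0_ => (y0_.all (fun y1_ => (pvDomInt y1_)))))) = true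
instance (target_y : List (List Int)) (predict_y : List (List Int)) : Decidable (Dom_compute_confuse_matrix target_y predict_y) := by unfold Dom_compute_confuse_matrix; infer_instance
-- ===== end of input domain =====

-- B transposes the loops: instead of A's sample-major pass mutating a dict via if/elif dispatch
-- over each sample's union set, B precomputes per-sample label sets and builds the result in one
-- label-major comprehension, counting TP/FP/FN per label over all samples.


-- ===== PORT A =====
-- one iteration of A's inner 'for label in unique_labels' loop
def ccmStepA (targe_tmp pre_tmp : List Int) (d : PySem.Dict Int (Int × Int × Int)) (label : Int) :
    PySem.Dict Int (Int × Int × Int) :=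
  d.insert label
    (let v := d.getD label (0, 0, 0)
     if label ∈ pre_tmp ∧ label ∈ targe_tmp then (v.1 + 1, v.2.1, v.2.2)
     else if label ∈ pre_tmp ∧ label ∉ targe_tmp then (v.1, v.2.1 + 1, v.2.2)
     else if label ∉ pre_tmp ∧ label ∈ targe_tmp then (v.1, v.2.1, v.2.2 + 1)
     else v)

def compute_confuse_matrix (target_y : List (List Int)) (predict_y : List (List Int)) :
    List (Int × Int × Int × Int) :=
  let label_dict : PySem.Dict Int (Int × Int × Int) :=
    (PySem.List.pyRange 0 89 1).foldl (fun d i => d.insert i (0, 0, 0)) PySem.Dict.empty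
  let label_dict :=
    (PySem.List.pyRange 0 (PySem.List.len target_y) 1).foldl
      (fun d num =>
        let targe_tmp := PySem.List.pyGetD target_y num []
        let pre_tmp := PySem.List.pyGetD predict_y num []
        let unique_labels := PySem.Set.ofList (targe_tmp ++ pre_tmp)
        unique_labels.foldl (ccmStepA targe_tmp pre_tmp) d)
      label_dict
  label_dict.items

-- ===== PORT B =====
def compute_confuse_matrix_alt (target_y : List (List Int)) (predict_y : List (List Int)) :
    List (Int × Int × Int × Int) :=
  let samples :=
    (PySem.List.pyRange 0 (PySem.List.len target_y) 1).map
      (fun i => (PySem.Set.ofList (PySem.List.pyGetD target_y i []),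
                 PySem.Set.ofList (PySem.List.pyGetD predict_y i [])))
  ((PySem.List.pyRange 0 89 1).foldl
      (fun d label =>
        d.insert label
          ((samples.countP (fun q => decide (label ∈ q.1) && decide (label ∈ q.2)) : Int),
           (samples.countP (fun q => decide (label ∈ q.2) && decide (label ∉ q.1)) : Int),
           (samples.countP (fun q => decide (label ∈ q.1) && decide (label ∉ q.2)) : Int)))
      PySem.Dict.empty).items

-- ===== PRECONDITION & SPEC =====
-- Pre_ excludes exactly the inputs where the Python A raises: an IndexError when predict_y is
-- shorter than target_y, and a KeyError when a processed sample mentions a label outside 0..88.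
def Pre_compute_confuse_matrix (target_y : List (List Int)) (predict_y : List (List Int)) : Prop :=
  target_y.length ≤ predict_y.length ∧
    ∀ q ∈ target_y.zip predict_y,
      (∀ x ∈ q.1, 0 ≤ x ∧ x < 89) ∧ (∀ x ∈ q.2, 0 ≤ x ∧ x < 89)
instance (target_y : List (List Int)) (predict_y : List (List Int)) :
    Decidable (Pre_compute_confuse_matrix target_y predict_y) := by
  unfold Pre_compute_confuse_matrix; infer_instance

def pvWitness_compute_confuse_matrix : List (List Int) × List (List Int) :=
  ([[1, 2], [3]], [[2, 4], [3, 5]])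

def Spec_compute_confuse_matrix (target_y : List (List Int)) (predict_y : List (List Int))
    (out : List (Int × Int × Int × Int)) : Prop :=
  out = compute_confuse_matrix_alt target_y predict_y
instance (target_y : List (List Int)) (predict_y : List (List Int)) (out : List (Int × Int × Int × Int)) :
    Decidable (Spec_compute_confuse_matrix target_y predict_y out) := by
  unfold Spec_compute_confuse_matrix; infer_instance

-- ===== CLAIM =====
def Claim_equal_compute_confuse_matrix : Prop := ∀ (target_y : List (List Int)) (predict_y : List (List Int)), Dom_compute_confuse_matrix target_y predict_y → Pre_compute_confuse_matrix target_y predict_y → Spec_compute_confuse_matrix target_y predict_y (compute_confuse_matrix target_y predict_y)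

-- ===== LEMMAS AND PROOFS =====

-- the invariant shape of the dictionary: keys 0..88 in order, value a function of the key
def ccmDictOf (g : Int → Int × Int × Int) : PySem.Dict Int (Int × Int × Int) :=
  PySem.Dict.mk ((PySem.List.pyRange 0 89 1).map (fun i => (i, g i)))

-- the mathematical per-label effect of one sample (targe_tmp = t, pre_tmp = p)
def ccmVal (t p : List Int) (x : Int) (v : Int × Int × Int) : Int × Int × Int :=
  if x ∈ p ∧ x ∈ t then (v.1 + 1, v.2.1, v.2.2)
  else if x ∈ p ∧ x ∉ t then (v.1, v.2.1 + 1, v.2.2)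
  else if x ∉ p ∧ x ∈ t then (v.1, v.2.1, v.2.2 + 1)
  else v

-- the per-label counts over a list of (target, predict) rows
def ccmTP (rows : List (List Int × List Int)) (x : Int) : Int :=
  (rows.countP (fun q => decide (x ∈ q.1) && decide (x ∈ q.2)) : Int)
def ccmFP (rows : List (List Int × List Int)) (x : Int) : Int :=
  (rows.countP (fun q => decide (x ∈ q.2) && decide (x ∉ q.1)) : Int)
def ccmFN (rows : List (List Int × List Int)) (x : Int) : Int :=
  (rows.countP (fun q => decide (x ∈ q.1) && decide (x ∉ q.2)) : Int)

set_option maxRecDepth 10000 in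
lemma ccmInit_eq :
    ((PySem.List.pyRange 0 89 1).foldl (fun d i => d.insert i ((0:Int), (0:Int), (0:Int))) PySem.Dict.empty)
      = ccmDictOf (fun _ => (0, 0, 0)) := by decide

set_option maxRecDepth 10000 in
lemma ccmRange_nodup : (PySem.List.pyRange 0 89 1).Nodup := by decide

lemma ccmDictOf_keys (g : Int → Int × Int × Int) :
    (ccmDictOf g).keys = PySem.List.pyRange 0 89 1 := by
  simp [ccmDictOf, PySem.Dict.keys, Function.comp_def]

lemma ccmDictOf_congr {g1 g2 : Int → Int × Int × Int}
    (h : ∀ i, 0 ≤ i → i < 89 → g1 i = g2 i) : ccmDictOf g1 = ccmDictOf g2 := by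
  unfold ccmDictOf
  congr 1
  apply List.map_congr_left
  intro i hi
  rw [PySem.List.mem_pyRange_one] at hi
  rw [h i hi.1 hi.2]

lemma ccmDictOf_getD (g : Int → Int × Int × Int) {k : Int} (h0 : 0 ≤ k) (h89 : k < 89) :
    (ccmDictOf g).getD k (0, 0, 0) = g k := by
  apply PySem.Dict.getD_of_mem_items
  · show (k, g k) ∈ (PySem.List.pyRange 0 89 1).map (fun i => (i, g i))
    exact List.mem_map_of_mem (PySem.List.mem_pyRange_one.mpr ⟨h0, h89⟩)
  · rw [ccmDictOf_keys]; exact ccmRange_nodup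

lemma ccmDictOf_insert (g : Int → Int × Int × Int) {k : Int} (h0 : 0 ≤ k) (h89 : k < 89) (v : Int × Int × Int) :
    (ccmDictOf g).insert k v = ccmDictOf (fun x => if x = k then v else g x) := by
  apply PySem.Dict.ext
  have hc : (ccmDictOf g).contains k = true := by
    rw [PySem.Dict.contains_iff_mem_keys, ccmDictOf_keys]
    exact PySem.List.mem_pyRange_one.mpr ⟨h0, h89⟩
  rw [PySem.Dict.items_insert_of_contains _ _ hc]
  show List.map _ ((PySem.List.pyRange 0 89 1).map (fun i => (i, g i)))
      = (PySem.List.pyRange 0 89 1).map (fun i => (i, if i = k then v else g i))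
  rw [List.map_map]
  apply List.map_congr_left
  intro i _
  by_cases hik : i = k
  · subst hik; simp
  · simp [hik]

-- a fold that writes back at each visited label (visited once, all in range) acts pointwise
lemma ccmFold_bump (h : Int → Int × Int × Int → Int × Int × Int) (L : List Int)
    (hnd : L.Nodup) (hb : ∀ x ∈ L, 0 ≤ x ∧ x < 89) (g : Int → Int × Int × Int) :
    L.foldl (fun d label => d.insert label (h label (d.getD label (0, 0, 0)))) (ccmDictOf g)
      = ccmDictOf (fun x => if x ∈ L then h x (g x) else g x) := by
  induction L generalizing g with
  | nil => simp
  | cons a L ih =>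
    have ha := hb a (List.mem_cons_self)
    rw [List.foldl_cons, ccmDictOf_getD g ha.1 ha.2, ccmDictOf_insert g ha.1 ha.2,
      ih hnd.of_cons (fun x hx => hb x (List.mem_cons_of_mem a hx))]
    apply ccmDictOf_congr
    intro i _ _
    by_cases hia : i = a
    · subst hia
      have hiL : i ∉ L := (List.nodup_cons.mp hnd).1
      simp [hiL]
    · by_cases hiL : i ∈ L <;> simp [hiL, hia, List.mem_cons]

-- A's inner loop over set(targe_tmp + pre_tmp) equals the pointwise ccmVal update
lemma ccmRowA (t p : List Int) (ht : ∀ x ∈ t, 0 ≤ x ∧ x < 89) (hp : ∀ x ∈ p, 0 ≤ x ∧ x < 89)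
    (g : Int → Int × Int × Int) :
    (PySem.Set.ofList (t ++ p)).foldl (ccmStepA t p) (ccmDictOf g)
      = ccmDictOf (fun x => ccmVal t p x (g x)) := by
  have h1 : (PySem.Set.ofList (t ++ p)).foldl (ccmStepA t p) (ccmDictOf g)
      = ccmDictOf (fun x => if x ∈ PySem.Set.ofList (t ++ p) then ccmVal t p x (g x) else g x) :=
    ccmFold_bump (ccmVal t p) (PySem.Set.ofList (t ++ p)) (PySem.Set.nodup_ofList _)
      (by intro x hx
          rcases List.mem_append.mp ((PySem.Set.mem_ofList _ _).mp hx) with h | h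
          · exact ht x h
          · exact hp x h) g
  rw [h1]
  apply ccmDictOf_congr
  intro i _ _
  by_cases hi : i ∈ PySem.Set.ofList (t ++ p)
  · simp [hi]
  · have hi' : i ∉ t ∧ i ∉ p := by
      rw [PySem.Set.mem_ofList, List.mem_append] at hi; tauto
    simp [hi, ccmVal, hi'.1, hi'.2]

-- A's whole sample loop accumulates exactly the per-label TP/FP/FN counts
lemma ccmLoopA (rows : List (List Int × List Int))
    (hb : ∀ q ∈ rows, (∀ x ∈ q.1, 0 ≤ x ∧ x < 89) ∧ (∀ x ∈ q.2, 0 ≤ x ∧ x < 89))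
    (g : Int → Int × Int × Int) :
    rows.foldl (fun d q => (PySem.Set.ofList (q.1 ++ q.2)).foldl (ccmStepA q.1 q.2) d) (ccmDictOf g)
      = ccmDictOf (fun x => ((g x).1 + ccmTP rows x, (g x).2.1 + ccmFP rows x, (g x).2.2 + ccmFN rows x)) := by
  induction rows generalizing g with
  | nil => simp [ccmTP, ccmFP, ccmFN]
  | cons q rows ih =>
    have hq := hb q (List.mem_cons_self)
    rw [List.foldl_cons, ccmRowA q.1 q.2 hq.1 hq.2 g,
      ih (fun r hr => hb r (List.mem_cons_of_mem q hr))]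
    apply ccmDictOf_congr
    intro x _ _
    simp only [ccmTP, ccmFP, ccmFN, List.countP_cons, ccmVal]
    by_cases h1 : x ∈ q.1 <;> by_cases h2 : x ∈ q.2 <;>
      simp [h1, h2, Prod.ext_iff] <;> omega

lemma ccmZip_getD (tl pl : List (List Int)) (hlen : tl.length ≤ pl.length) {j : Int}
    (h0 : 0 ≤ j) (hj : j < tl.length) :
    PySem.List.pyGetD (tl.zip pl) j ([], []) =
      (PySem.List.pyGetD tl j [], PySem.List.pyGetD pl j []) := by
  obtain ⟨n, rfl⟩ := Int.eq_ofNat_of_zero_le h0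
  have hn : n < tl.length := by exact_mod_cast hj
  have hz : n < (tl.zip pl).length := by rw [List.length_zip]; omega
  have hp : n < pl.length := by omega
  rw [PySem.List.pyGetD_natCast, PySem.List.pyGetD_natCast, PySem.List.pyGetD_natCast]
  simp [List.getD_eq_getElem?_getD,
    List.getElem?_eq_getElem hn, List.getElem?_eq_getElem hp, List.getElem?_eq_getElem hz]

-- B's samples list is the zip of the two inputs, each row turned into its pair of sets
lemma ccmSamples_eq (tl pl : List (List Int)) (hlen : tl.length ≤ pl.length) :
    (PySem.List.pyRange 0 (PySem.List.len tl) 1).map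
        (fun i => (PySem.Set.ofList (PySem.List.pyGetD tl i []),
                   PySem.Set.ofList (PySem.List.pyGetD pl i [])))
      = (tl.zip pl).map (fun q => (PySem.Set.ofList q.1, PySem.Set.ofList q.2)) := by
  have hzlen : (tl.zip pl).length = tl.length := by rw [List.length_zip]; omega
  rw [show PySem.List.len tl = ((tl.zip pl).length : Int) by rw [PySem.List.len_eq, hzlen]]
  rw [List.map_congr_left
      (g := fun j => (fun q : List Int × List Int => (PySem.Set.ofList q.1, PySem.Set.ofList q.2))
        (PySem.List.pyGetD (tl.zip pl) j ([], [])))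
      (by intro j hj
          rw [PySem.List.mem_pyRange_one] at hj
          have hj' : j < (tl.length : Int) := by rw [hzlen] at hj; exact_mod_cast hj.2
          show _ = (fun q : List Int × List Int => (PySem.Set.ofList q.1, PySem.Set.ofList q.2))
            (PySem.List.pyGetD (tl.zip pl) j ([], []))
          rw [ccmZip_getD tl pl hlen hj.1 hj'])]
  rw [show (fun j => (fun q : List Int × List Int => (PySem.Set.ofList q.1, PySem.Set.ofList q.2))
        (PySem.List.pyGetD (tl.zip pl) j ([], [])))
      = ((fun q : List Int × List Int => (PySem.Set.ofList q.1, PySem.Set.ofList q.2)) ∘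
          (fun j => PySem.List.pyGetD (tl.zip pl) j ([], []))) from rfl,
    ← List.map_map, PySem.List.map_pyGetD_pyRange_zero' (tl.zip pl) ([], [])]

-- B's fresh-key insert loop over 0..88, from the empty dict, is exactly the items map
lemma ccmB_items (v : Int → Int × Int × Int) :
    ((PySem.List.pyRange 0 89 1).foldl (fun d label => d.insert label (v label)) PySem.Dict.empty).items
      = (PySem.List.pyRange 0 89 1).map (fun i => (i, v i)) := by
  have h := PySem.Dict.items_foldl_insert_fresh (d := PySem.Dict.empty)
      (l := PySem.List.pyRange 0 89 1) (k := fun a => a) (v := v)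
      (by intro a _; exact PySem.Dict.contains_empty a)
      (by simpa using ccmRange_nodup)
  simpa using h

-- B's whole computation, on the zipped rows, returns the items of the count dictionary
lemma ccmB_side (rows : List (List Int × List Int)) :
    (ccmDictOf fun x => (ccmTP rows x, ccmFP rows x, ccmFN rows x)).items
      = ((PySem.List.pyRange 0 89 1).foldl
          (fun d label =>
            d.insert label
              ((((rows.map (fun q => (PySem.Set.ofList q.1, PySem.Set.ofList q.2))).countP
                  (fun q => decide (label ∈ q.1) && decide (label ∈ q.2)) : Int)),
               (((rows.map (fun q => (PySem.Set.ofList q.1, PySem.Set.ofList q.2))).countP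
                  (fun q => decide (label ∈ q.2) && decide (label ∉ q.1)) : Int)),
               (((rows.map (fun q => (PySem.Set.ofList q.1, PySem.Set.ofList q.2))).countP
                  (fun q => decide (label ∈ q.1) && decide (label ∉ q.2)) : Int))))
          PySem.Dict.empty).items := by
  rw [ccmB_items]
  show List.map _ _ = List.map _ _
  apply List.map_congr_left
  intro x _
  have key : ∀ p : List Int × List Int → Bool,
      (rows.map (fun q => (PySem.Set.ofList q.1, PySem.Set.ofList q.2))).countP p
        = rows.countP (fun q => p (PySem.Set.ofList q.1, PySem.Set.ofList q.2)) := by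
    intro p; rw [List.countP_map]; rfl
  simp only [key, ccmTP, ccmFP, ccmFN]
  have memc : ∀ (x : Int) (l : List Int), decide (x ∈ PySem.Set.ofList l) = decide (x ∈ l) := by
    intro x l; simp [PySem.Set.mem_ofList]
  have memc' : ∀ (x : Int) (l : List Int), decide (x ∉ PySem.Set.ofList l) = decide (x ∉ l) := by
    intro x l; simp [PySem.Set.mem_ofList]
  simp only [memc, memc']

-- ===== VERDICT (by name: the statement is the Claim_ definition above) =====
theorem compute_confuse_matrix_spec : Claim_equal_compute_confuse_matrix := by
  intro tl pl _ hpre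
  obtain ⟨hlen, hlab⟩ := hpre
  show compute_confuse_matrix tl pl = compute_confuse_matrix_alt tl pl
  unfold compute_confuse_matrix compute_confuse_matrix_alt
  simp only [ccmInit_eq, ccmSamples_eq tl pl hlen]
  -- A side: rewrite the index loop into a loop over the zipped rows, then count
  have hzlen : (tl.zip pl).length = tl.length := by rw [List.length_zip]; omega
  rw [show PySem.List.len tl = ((tl.zip pl).length : Int) by rw [PySem.List.len_eq, hzlen]]
  rw [PySem.List.foldl_congr_mem _ _
      (fun acc j => (fun d (q : List Int × List Int) =>
        (PySem.Set.ofList (q.1 ++ q.2)).foldl (ccmStepA q.1 q.2) d) acc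
          (PySem.List.pyGetD (tl.zip pl) j ([], []))) _
      (by intro acc j hj
          rw [PySem.List.mem_pyRange_one] at hj
          have hj' : j < (tl.length : Int) := by rw [hzlen] at hj; exact hj.2
          show _ = (fun d (q : List Int × List Int) =>
            (PySem.Set.ofList (q.1 ++ q.2)).foldl (ccmStepA q.1 q.2) d) acc
              (PySem.List.pyGetD (tl.zip pl) j ([], []))
          rw [ccmZip_getD tl pl hlen hj.1 hj'])]
  rw [PySem.List.foldl_pyRange_zero_pyGetD' (tl.zip pl) ([], [])
    (fun d (q : List Int × List Int) =>
      (PySem.Set.ofList (q.1 ++ q.2)).foldl (ccmStepA q.1 q.2) d)]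
  rw [ccmLoopA (tl.zip pl) (fun q hq => hlab q hq)]
  rw [ccmDictOf_congr (g2 := fun x => (ccmTP (tl.zip pl) x, ccmFP (tl.zip pl) x, ccmFN (tl.zip pl) x))
      (by intro i _ _; norm_num)]
  exact ccmB_side (tl.zip pl)
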